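-- pv_equiv track=rewrite | github.com/conneroisu/zen-browser-flake | update.py | update_version
-- ===== SOURCE A (Python) =====
-- def update_version(content: str, version: str):
--     """Update version using the version tag."""
--     lines = content.split("\n")
--     for i, line in enumerate(lines):
--         if "#:version:" in line:
--             # Update the next line that contains 'version ='
--             for j in range(i + 1, len(lines)):
--                 if "version =" in lines[j]:
--                     lines[j] = f'    version = "{version}";'
--                     break
--     return "\n".join(lines)
-- ===== SOURCE B (Python) =====
-- def update_version(content: str, version: str):
--     """Update version using the version tag (single forward pass with a pending-marker flag)."""
--     repl = f'    version = "{version}";'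
--     out = []
--     pending = False
--     for line in content.split("\n"):
--         if pending and "version =" in line:
--             out.append(repl)
--             pending = False
--         elif "#:version:" in line:
--             out.append(line)
--             pending = True
--         else:
--             out.append(line)
--     return "\n".join(out)
-- ===== Notes on version B (the rewrite author's own statement) =====
-- stated objective: simpler
-- what changed: Replaces A's outer enumerate with a nested forward rescan (and in-place list mutation) by a single forward pass that carries a boolean 'pending marker' flag and appends to an output list.
import Mathlib
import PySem

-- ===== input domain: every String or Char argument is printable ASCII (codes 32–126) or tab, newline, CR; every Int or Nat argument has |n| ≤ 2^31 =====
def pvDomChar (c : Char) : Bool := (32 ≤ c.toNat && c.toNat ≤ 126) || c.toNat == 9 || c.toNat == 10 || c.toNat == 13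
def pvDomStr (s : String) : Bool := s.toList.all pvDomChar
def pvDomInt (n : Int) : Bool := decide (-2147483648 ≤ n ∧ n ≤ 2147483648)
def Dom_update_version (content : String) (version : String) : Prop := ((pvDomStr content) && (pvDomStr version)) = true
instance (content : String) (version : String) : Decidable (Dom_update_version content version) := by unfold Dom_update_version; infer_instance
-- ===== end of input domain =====

-- B replaces A's nested rescan (enumerate + inner forward scan with in-place list mutation) by a single
-- forward pass carrying a pending-marker flag; return values agree on all inputs admitted by Pre_.

-- shared helpers: the two membership tests '"version =" in line' and '"#:version:" in line'
def uvIsVer (l : String) : Bool := PySem.Str.isIn "version =" l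
def uvIsMark (l : String) : Bool := PySem.Str.isIn "#:version:" l

-- the f-string '    version = "{version}";'
def uvRepl (version : String) : String :=
  PySem.Str.join "" ["    version = \"", version, "\";"]

-- ===== PORT A =====
-- inner loop: 'for j in range(i+1, len(lines)): if "version =" in lines[j]: lines[j] = repl; break'
def uvInner (repl : String) (ls : List String) : List Nat → List String
  | [] => ls
  | j :: js =>
      if uvIsVer (ls.getD j "") then ls.set j repl
      else uvInner repl ls js

-- outer loop: 'for i, line in enumerate(lines)' (line is re-read from the mutated list each step)
def uvOuter (repl : String) : List Nat → List String → List String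
  | [], ls => ls
  | i :: is, ls =>
      uvOuter repl is
        (if uvIsMark (ls.getD i "") then
           uvInner repl ls (List.range' (i + 1) (ls.length - (i + 1)))
         else ls)

def update_version (content : String) (version : String) : String :=
  let lines := (PySem.Str.split? content "\n").getD []
  PySem.Str.join "\n" (uvOuter (uvRepl version) (List.range lines.length) lines)

-- ===== PORT B =====
-- one step of B's loop over the lines, state = (out, pending)
def uvStep (repl : String) (st : List String × Bool) (line : String) : List String × Bool :=
  if st.2 && uvIsVer line then (st.1 ++ [repl], false)
  else if uvIsMark line then (st.1 ++ [line], true)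
  else (st.1 ++ [line], st.2)

def update_version_alt (content : String) (version : String) : String :=
  let repl := uvRepl version
  PySem.Str.join "\n" ((((PySem.Str.split? content "\n").getD []).foldl (uvStep repl) ([], false)).1)

-- ===== PRECONDITION & SPEC =====
-- Pre_ excludes version strings that themselves contain the marker token '#:version:': there A re-reads
-- its own replacement text as a fresh marker (a corner of its in-place mutation no caller would specify),
-- while B treats the replacement as plain output; both behaviours are accidental, so the corner is excluded.
def Pre_update_version (content : String) (version : String) : Prop :=
  PySem.Str.isIn "#:version:" version = false
instance (content : String) (version : String) : Decidable (Pre_update_version content version) := by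
  unfold Pre_update_version; infer_instance

def pvWitness_update_version : String × String :=
  ("#:version:\nversion = \"old\";\ndone", "1.2.3")

def Spec_update_version (content : String) (version : String) (out : String) : Prop :=
  out = update_version_alt content version
instance (content : String) (version : String) (out : String) : Decidable (Spec_update_version content version out) := by
  unfold Spec_update_version; infer_instance

-- ===== CLAIM (what is proved, stated in full; the proofs are below) =====
def Claim_equal_update_version : Prop :=
  ∀ (content : String) (version : String), Dom_update_version content version →
    Pre_update_version content version →
    Spec_update_version content version (update_version content version)

-- ===== LEMMAS AND PROOFS =====

-- replace the first line containing "version =" (what one round of A's inner loop does to the tail)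
def uvReplaceFirst (repl : String) : List String → List String
  | [] => []
  | l :: rest =>
      if uvIsVer l then repl :: rest
      else l :: uvReplaceFirst repl rest

lemma length_uvReplaceFirst (repl : String) (ls : List String) :
    (uvReplaceFirst repl ls).length = ls.length := by
  induction ls with
  | nil => rfl
  | cons l rest ih => simp only [uvReplaceFirst]; split <;> simp [ih]

-- A's algorithm, written as head recursion over the (mutated) suffix
def uvARec (repl : String) : List String → List String
  | [] => []
  | l :: rest =>
      if uvIsMark l then l :: uvARec repl (uvReplaceFirst repl rest)
      else l :: uvARec repl rest
termination_by ls => ls.length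
decreasing_by all_goals simp [length_uvReplaceFirst]

-- B's algorithm, written as head recursion carrying the pending flag
def uvBRec (repl : String) : List String → Bool → List String
  | [], _ => []
  | l :: rest, pending =>
      if pending && uvIsVer l then repl :: uvBRec repl rest false
      else if uvIsMark l then l :: uvBRec repl rest true
      else l :: uvBRec repl rest pending

lemma uvGetD_mid (pre : List String) (l : String) (suf : List String) :
    (pre ++ l :: suf).getD pre.length "" = l := by
  simp [List.getD]

-- A's inner loop over range(i+1, len) replaces the first "version =" line of the suffix
lemma uvInner_eq (repl : String) (suf : List String) : ∀ (pre : List String),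
    uvInner repl (pre ++ suf) (List.range' pre.length suf.length) = pre ++ uvReplaceFirst repl suf := by
  induction suf with
  | nil => intro pre; simp [uvInner, uvReplaceFirst]
  | cons l rest ih =>
      intro pre
      rw [List.length_cons, List.range'_succ]
      simp only [uvInner, uvReplaceFirst, uvGetD_mid]
      cases h : uvIsVer l with
      | true => simp
      | false =>
        have := ih (pre ++ [l])
        simp only [List.append_assoc, List.singleton_append, List.length_append,
          List.length_cons, List.length_nil, Nat.zero_add] at this
        simp [this]

-- A's outer loop over range(i, len) computes uvARec on the suffix
lemma uvOuter_eq (repl : String) : ∀ (n : Nat) (suf pre : List String), suf.length = n →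
    uvOuter repl (List.range' pre.length suf.length) (pre ++ suf) = pre ++ uvARec repl suf := by
  intro n
  induction n with
  | zero => intro suf pre h; rw [List.length_eq_zero_iff] at h; subst h; simp [uvOuter, uvARec]
  | succ n ih =>
      intro suf pre hlen
      match suf, hlen with
      | l :: rest, hlen =>
        have hr : rest.length = n := by simpa using hlen
        rw [List.length_cons, List.range'_succ]
        simp only [uvOuter, uvARec, uvGetD_mid]
        cases h : uvIsMark l with
        | true =>
          have hin := uvInner_eq repl rest (pre ++ [l])
          simp only [List.append_assoc, List.singleton_append, List.length_append,
            List.length_cons, List.length_nil, Nat.zero_add, hr] at hin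
          have hout := ih (uvReplaceFirst repl rest) (pre ++ [l])
            (by simp [length_uvReplaceFirst, hr])
          simp only [List.append_assoc, List.singleton_append, List.length_append,
            List.length_cons, List.length_nil, Nat.zero_add,
            length_uvReplaceFirst, hr] at hout
          simp [hr]
          rw [show pre.length + (n + 1) - (pre.length + 1) = n from by omega, hin, hout]
        | false =>
          have hout := ih rest (pre ++ [l]) hr
          simp only [List.append_assoc, List.singleton_append, List.length_append,
            List.length_cons, List.length_nil, Nat.zero_add, hr] at hout
          simp [hr, hout]

-- B's foldl with (out, pending) accumulator computes uvBRec
lemma uvFoldl_eq (repl : String) : ∀ (ls acc : List String) (p : Bool),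
    (ls.foldl (uvStep repl) (acc, p)).1 = acc ++ uvBRec repl ls p := by
  intro ls
  induction ls with
  | nil => intro acc p; simp [uvBRec]
  | cons l rest ih =>
      intro acc p
      simp only [List.foldl_cons, uvStep, uvBRec]
      cases hv : uvIsVer l with
      | true =>
        cases p with
        | true => simp [ih]
        | false => cases hm : uvIsMark l <;> simp [ih]
      | false => cases hm : uvIsMark l <;> simp [ih]

-- replacing twice replaces the same line with the same text (repl itself contains "version =")
lemma uvReplaceFirst_idem (repl : String) (hver : uvIsVer repl = true)
    (ls : List String) : uvReplaceFirst repl (uvReplaceFirst repl ls) = uvReplaceFirst repl ls := by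
  induction ls with
  | nil => rfl
  | cons l rest ih =>
      simp only [uvReplaceFirst]
      cases h : uvIsVer l with
      | true => simp [uvReplaceFirst, hver]
      | false => simp [h, uvReplaceFirst, ih]

-- the bridge: B's flag pass equals A's rescan pass (pending ↔ the suffix already had its first
-- "version =" line replaced), provided repl contains "version =" and not "#:version:"
lemma uvBRec_eq_uvARec (repl : String) (hver : uvIsVer repl = true)
    (hmark : uvIsMark repl = false) : ∀ ls : List String,
    uvBRec repl ls false = uvARec repl ls ∧
    uvBRec repl ls true = uvARec repl (uvReplaceFirst repl ls) := by
  intro ls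
  induction ls with
  | nil => exact ⟨by simp [uvBRec, uvARec], by simp [uvBRec, uvARec, uvReplaceFirst]⟩
  | cons l rest ih =>
      constructor
      · simp only [uvBRec, uvARec, Bool.false_and, Bool.false_eq_true, if_false]
        cases h : uvIsMark l with
        | true => simp [ih.2]
        | false => simp [ih.1]
      · simp only [uvBRec, uvReplaceFirst, Bool.true_and]
        cases hv : uvIsVer l with
        | true => simp [uvARec, hmark, ih.1]
        | false =>
          cases h : uvIsMark l with
          | true =>
            simp [uvARec, h, ih.2, uvReplaceFirst_idem repl hver rest]
          | false => simp [h, uvARec, ih.2]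

lemma uvRepl_toList (v : String) :
    (uvRepl v).toList = "    version = \"".toList ++ v.toList ++ "\";".toList := by
  rw [uvRepl, PySem.Str.toList_join]
  simp [PySem.Chars.join_cons_cons, PySem.Chars.join_singleton]

lemma uvVer_in_uvRepl (v : String) : uvIsVer (uvRepl v) = true := by
  rw [uvIsVer, PySem.Str.isIn_iff_infix, uvRepl_toList]
  refine ⟨"    ".toList, " \"".toList ++ v.toList ++ "\";".toList, ?_⟩
  have h : "    ".toList ++ "version =".toList ++ " \"".toList = "    version = \"".toList := by decide
  rw [← h]; simp

-- an infix whose head does not occur in the left part of an append lies in the right part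
lemma uvInfix_right (c : Char) (t y : List Char) :
    ∀ p : List Char, c ∉ p → (c :: t) <:+: p ++ y → (c :: t) <:+: y := by
  intro p
  induction p with
  | nil => intro _ h; simpa using h
  | cons a p ih =>
      intro hcp h
      rw [List.cons_append, List.infix_cons_iff] at h
      rcases h with h | h
      · have hca := (List.cons_prefix_cons.mp h).1
        subst hca
        exact absurd (List.mem_cons_self ..) hcp
      · exact ih (fun hm => hcp (List.mem_cons_of_mem _ hm)) h

lemma uvMark_notin_uvRepl (v : String) (h : PySem.Str.isIn "#:version:" v = false) :
    uvIsMark (uvRepl v) = false := by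
  cases hb : uvIsMark (uvRepl v) with
  | false => rfl
  | true =>
      exfalso
      rw [uvIsMark, PySem.Str.isIn_iff_infix, uvRepl_toList, List.append_assoc] at hb
      have hm : "#:version:".toList = '#' :: ":version:".toList := by decide
      rw [hm] at hb
      have h1 := uvInfix_right '#' ":version:".toList _ _ (by decide) hb
      have h2 : ('#' :: ":version:".toList).reverse <:+: ("\";".toList.reverse ++ v.toList.reverse) := by
        rw [← List.reverse_append]
        exact List.reverse_infix.mpr h1
      have hmr : ('#' :: ":version:".toList).reverse = ':' :: "noisrev:#".toList := by decide
      rw [hmr] at h2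
      have h3 := uvInfix_right ':' "noisrev:#".toList _ _ (by decide) h2
      rw [← hmr] at h3
      have h4 : "#:version:".toList <:+: v.toList := by
        rw [hm]; exact List.reverse_infix.mp h3
      have h5 := (PySem.Str.isIn_iff_infix "#:version:" v).mpr h4
      rw [h] at h5
      cases h5

-- ===== VERDICT (by name: the statement is the Claim_ definition above) =====
theorem update_version_spec : Claim_equal_update_version := by
  intro content version _ hpre
  unfold Spec_update_version
  simp only [update_version, update_version_alt]
  have hver := uvVer_in_uvRepl version
  have hmark := uvMark_notin_uvRepl version hpre
  have hA := uvOuter_eq (uvRepl version) ((PySem.Str.split? content "\n").getD []).length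
    ((PySem.Str.split? content "\n").getD []) [] rfl
  simp only [List.nil_append, List.length_nil] at hA
  have hB := uvFoldl_eq (uvRepl version) ((PySem.Str.split? content "\n").getD []) [] false
  simp only [List.nil_append] at hB
  rw [List.range_eq_range', hA, hB, (uvBRec_eq_uvARec (uvRepl version) hver hmark _).1]
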